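-- pv_equiv track=rewrite | github.com/muhammadsodiqadhamov307-droid/odooprintxprinter | print_agent.py | _wrap_words
-- ===== SOURCE A (Python) =====
-- def _truncate(text, width):
--     text = str(text or '')
--     return text if len(text) <= width else text[: max(0, width - 1)] + '.'
--
-- def _wrap_words(text, width):
--     text = str(text or '').strip()
--     width = max(1, int(width))
--     if not text:
--         return ['']
--
--     words = text.split()
--     if not words:
--         return [_truncate(text, width)]
--
--     lines = []
--     current = words[0]
--     for word in words[1:]:
--         candidate = f'{current} {word}'
--         if len(candidate) <= width:
--             current = candidate
--         else:
--             lines.append(current)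
--             current = word
--     lines.append(current)
--
--     normalized = []
--     for line in lines:
--         if len(line) <= width:
--             normalized.append(line)
--             continue
--         remainder = line
--         while len(remainder) > width:
--             normalized.append(remainder[:width])
--             remainder = remainder[width:]
--         if remainder:
--             normalized.append(remainder)
--     return normalized or ['']
-- ===== SOURCE B (Python) =====
-- def _wrap_words(text, width):
--     # Different algorithm: instead of packing lines first and then hard-splitting
--     # over-long lines in a second pass, B relies on the invariant that an
--     # over-long line can only ever be a single over-long word, so it detects
--     # over-long words up front, chunks them directly into the output, and keeps
--     # the running line `current` always within width.
--     text = str(text or '').strip()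
--     width = max(1, int(width))
--     if not text:
--         return ['']
--
--     out = []
--     current = ''
--     for word in text.split():
--         if len(word) > width:
--             # an over-long word always stands on its own lines, in width chunks
--             if current:
--                 out.append(current)
--             i = 0
--             while i < len(word):
--                 out.append(word[i:i + width])
--                 i += width
--             current = ''
--         elif not current:
--             current = word
--         elif len(current) + 1 + len(word) <= width:
--             current = current + ' ' + word
--         else:
--             out.append(current)
--             current = word
--     if current:
--         out.append(current)
--     return out
-- ===== Notes on version B (the rewrite author's own statement) =====
-- stated objective: alternative
-- what changed: B replaces A's two-stage pipeline (greedily pack words into lines, then a second normalization pass that hard-splits any over-long line into width chunks) by a single word-level pass built on the invariant that an over-long line can only ever be a single over-long word: over-long words are detected up front and chunked directly into the output, so the running line always stays within width and no over-long line or normalization pass ever exists.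
import Mathlib
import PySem

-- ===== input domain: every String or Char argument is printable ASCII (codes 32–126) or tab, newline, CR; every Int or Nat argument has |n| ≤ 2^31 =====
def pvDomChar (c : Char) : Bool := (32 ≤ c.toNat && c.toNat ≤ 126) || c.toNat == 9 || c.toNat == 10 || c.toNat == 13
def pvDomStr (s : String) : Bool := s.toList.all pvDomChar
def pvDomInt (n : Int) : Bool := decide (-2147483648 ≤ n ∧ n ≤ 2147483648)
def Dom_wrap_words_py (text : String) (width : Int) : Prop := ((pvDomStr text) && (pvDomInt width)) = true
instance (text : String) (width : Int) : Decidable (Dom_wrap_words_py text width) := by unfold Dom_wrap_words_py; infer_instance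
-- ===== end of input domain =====

-- B replaces A's two-stage pipeline (greedy pack, then hard-split over-long lines)
-- by a single word-level pass that chunks over-long WORDS directly into the output,
-- using the invariant that an over-long line can only be a single over-long word;
-- objective: alternative (same cost, different algorithmic decomposition).

-- ===== PORT A =====
-- helper: A's `_truncate` (reached only on A's dead branch, ported faithfully)
def pvTruncA (t : List Char) (w : Int) : List Char :=
  if (t.length : Int) ≤ w then t
  else PySem.List.slice t none (some (max 0 (w - 1))) ++ ['.']

-- helper: A's `while len(remainder) > width` loop plus the trailing `if remainder`;
-- the chunk width is `w + 1` (caller passes width - 1; width ≥ 1 always holds).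
def pvChunkA (w : Nat) (rem : List Char) : List (List Char) :=
  if _h : w + 1 < rem.length then
    rem.take (w + 1) :: pvChunkA w (rem.drop (w + 1))
  else if rem.isEmpty then [] else [rem]
termination_by rem.length
decreasing_by simp; omega

def wrap_words_py (text : String) (width : Int) : List String :=
  let t := PySem.Chars.strip text.toList
  let w : Int := max 1 width
  if t.isEmpty then [""]
  else
    let words := PySem.Chars.split₀ t
    if words.isEmpty then [String.ofList (pvTruncA t w)]
    else
      let st := (words.tail).foldl
        (fun (st : List (List Char) × List Char) word =>
          let candidate := st.2 ++ ' ' :: word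
          if (candidate.length : Int) ≤ w then (st.1, candidate)
          else (st.1 ++ [st.2], word))
        ([], words.headD [])
      let lines := st.1 ++ [st.2]
      let normalized := lines.foldl
        (fun acc line =>
          if (line.length : Int) ≤ w then acc ++ [line]
          else acc ++ pvChunkA (w.toNat - 1) line)
        []
      if normalized.isEmpty then [""] else normalized.map String.ofList

-- ===== PORT B =====
-- helper: B's `while i < len(word)` loop — chunks an over-long word into the
-- output (chunk width is `w + 1`; caller passes width - 1, width ≥ 1 always holds).
def pvChunksB (w : Nat) (word : List Char) (i : Nat) (out : List (List Char)) : List (List Char) :=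
  if _h : i < word.length then
    pvChunksB w word (i + (w + 1))
      (out ++ [PySem.List.slice word (some (i : Int)) (some ((i : Int) + ((w : Int) + 1)))])
  else out
termination_by word.length - i
decreasing_by omega

-- helper: the body of B's `for word in text.split()` loop
def pvStepB (w : Int) (st : List (List Char) × List Char) (word : List Char) :
    List (List Char) × List Char :=
  if w < (word.length : Int) then
    let out1 := if st.2.isEmpty then st.1 else st.1 ++ [st.2]
    (pvChunksB (w.toNat - 1) word 0 out1, [])
  else if st.2.isEmpty then (st.1, word)
  else if (st.2.length : Int) + 1 + (word.length : Int) ≤ w then (st.1, st.2 ++ ' ' :: word)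
  else (st.1 ++ [st.2], word)

def wrap_words_py_alt (text : String) (width : Int) : List String :=
  let t := PySem.Chars.strip text.toList
  let w : Int := max 1 width
  if t.isEmpty then [""]
  else
    let st := (PySem.Chars.split₀ t).foldl (pvStepB w) ([], [])
    (if st.2.isEmpty then st.1 else st.1 ++ [st.2]).map String.ofList

-- ===== PRECONDITION & SPEC =====
def Spec_wrap_words_py (text : String) (width : Int) (out : List String) : Prop := out = wrap_words_py_alt text width
instance (text : String) (width : Int) (out : List String) : Decidable (Spec_wrap_words_py text width out) := by unfold Spec_wrap_words_py; infer_instance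

-- ===== CLAIM (what is proved, stated in full; the proofs are below) =====
def Claim_equal_wrap_words_py : Prop := ∀ (text : String) (width : Int), Dom_wrap_words_py text width → Spec_wrap_words_py text width (wrap_words_py text width)

-- ===== LEMMAS AND PROOFS =====

-- reference greedy packer: the lines A's first loop produces, as a list
def pvGreedy (w : Int) : List (List Char) → List Char → List (List Char)
  | [], cur => [cur]
  | wd :: ws, cur =>
    if ((cur ++ ' ' :: wd).length : Int) ≤ w then pvGreedy w ws (cur ++ ' ' :: wd)
    else cur :: pvGreedy w ws wd

theorem pvGreedy_ne_nil (w : Int) (ws : List (List Char)) (cur : List Char) :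
    pvGreedy w ws cur ≠ [] := by
  induction ws generalizing cur with
  | nil => simp [pvGreedy]
  | cons wd ws ih => simp only [pvGreedy]; split <;> simp [ih]

theorem pvGreedy_mem_ne_nil (w : Int) (ws : List (List Char)) (cur : List Char)
    (hc : cur ≠ []) (hw : ∀ x ∈ ws, x ≠ []) :
    ∀ l ∈ pvGreedy w ws cur, l ≠ [] := by
  induction ws generalizing cur with
  | nil => simpa [pvGreedy] using hc
  | cons wd ws ih =>
    intro l hl
    simp only [pvGreedy] at hl
    split at hl
    · exact ih _ (by simp) (fun x hx => hw x (by simp [hx])) l hl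
    · rcases List.mem_cons.mp hl with h | h
      · exact h ▸ hc
      · exact ih _ (hw wd (by simp)) (fun x hx => hw x (by simp [hx])) l h

-- an over-long word is never joined with the next word
theorem pvGreedy_overlong (w : Int) (rest : List (List Char)) (wd : List Char)
    (h : w < (wd.length : Int)) :
    pvGreedy w rest wd
      = wd :: (match rest with | [] => [] | r :: rs => pvGreedy w rs r) := by
  cases rest with
  | nil => simp [pvGreedy]
  | cons r rs =>
    simp only [pvGreedy]
    rw [if_neg (by simp only [List.length_append, List.length_cons]; push_cast; omega)]

-- A's first loop produces exactly pvGreedy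
theorem pvFoldA_eq (w : Int) (ws : List (List Char)) (lines : List (List Char)) (cur : List Char) :
    (let st := ws.foldl
        (fun (st : List (List Char) × List Char) word =>
          let candidate := st.2 ++ ' ' :: word
          if (candidate.length : Int) ≤ w then (st.1, candidate)
          else (st.1 ++ [st.2], word)) (lines, cur)
     st.1 ++ [st.2]) = lines ++ pvGreedy w ws cur := by
  induction ws generalizing lines cur with
  | nil => simp [pvGreedy]
  | cons wd ws ih =>
    simp only [List.foldl_cons, pvGreedy]
    split
    · rw [ih]
    · rw [ih]; simp

theorem pvChunkA_short (w : Nat) (line : List Char) (hne : line ≠ [])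
    (hle : line.length ≤ w + 1) : pvChunkA w line = [line] := by
  rw [pvChunkA, dif_neg (by omega), if_neg (by simpa using hne)]

theorem pvChunkA_ne_nil (w : Nat) (line : List Char) (hne : line ≠ []) :
    pvChunkA w line ≠ [] := by
  rw [pvChunkA]
  split
  · simp
  · rw [if_neg (by simpa using hne)]; simp

-- B's word-chunking loop appends exactly A's per-line chunks of the suffix
theorem pvChunksB_eq (w : Nat) (word : List Char) (i : Nat) (out : List (List Char)) :
    pvChunksB w word i out = out ++ pvChunkA w (word.drop i) := by
  fun_induction pvChunksB w word i out with
  | case1 i out h ih =>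
    have hdlen : (word.drop i).length = word.length - i := List.length_drop ..
    rw [ih]
    have hs : PySem.List.slice word (some (i : Int)) (some ((i : Int) + ((w : Int) + 1)))
        = (word.drop i).take (w + 1) := by
      have hc : ((i : Int) + ((w : Int) + 1)) = ((i : Int) + ((w + 1 : Nat) : Int)) := by push_cast; ring
      rw [hc, PySem.List.slice_natCast_add]
    rw [hs]
    by_cases hlong : w + 1 < (word.drop i).length
    · conv_rhs => rw [pvChunkA, dif_pos hlong]
      simp
    · have hend : word.drop (i + (w + 1)) = [] := by
        apply List.drop_eq_nil_of_le
        omega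
      rw [hend]
      have hnemp : ¬ ((word.drop i).isEmpty = true) := by
        simp only [List.isEmpty_iff_length_eq_zero]
        omega
      conv_rhs => rw [pvChunkA, dif_neg hlong, if_neg hnemp]
      rw [List.take_of_length_le (by omega)]
      have hnil : pvChunkA w ([] : List Char) = [] := by
        rw [pvChunkA, dif_neg (by simp), if_pos (by simp)]
      rw [hnil]
      simp
  | case2 i out h =>
    have hend : word.drop i = [] := List.drop_eq_nil_of_le (by omega)
    rw [hend]
    rw [pvChunkA, dif_neg (by simp), if_pos (by simp)]
    simp

-- A's normalization pass is flatMap over per-line chunks (on nonempty lines)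
theorem pvNormA_eq (w : Int) (hw : 1 ≤ w) (ls : List (List Char)) (acc : List (List Char))
    (h : ∀ l ∈ ls, l ≠ []) :
    ls.foldl
      (fun acc line =>
        if (line.length : Int) ≤ w then acc ++ [line]
        else acc ++ pvChunkA (w.toNat - 1) line) acc
    = acc ++ ls.flatMap (pvChunkA (w.toNat - 1)) := by
  induction ls generalizing acc with
  | nil => simp
  | cons l ls ih =>
    simp only [List.foldl_cons, List.flatMap_cons]
    rw [ih _ (fun x hx => h x (by simp [hx]))]
    split
    · rw [pvChunkA_short _ _ (h l (by simp)) (by omega)]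
      simp
    · simp

-- B's single pass computes flatMap of chunks over A's greedy lines:
-- Main part (running line `cur` nonempty and within width) and Fresh part
-- (just after an over-long word, `cur` empty), proved together.
theorem pvFoldB_both (w : Int) (hw : 1 ≤ w) (ws : List (List Char)) (hws : ∀ x ∈ ws, x ≠ []) :
    (∀ (out : List (List Char)) (cur : List Char), cur ≠ [] → (cur.length : Int) ≤ w →
      (let st := ws.foldl (pvStepB w) (out, cur)
       if st.2.isEmpty then st.1 else st.1 ++ [st.2])
      = out ++ (pvGreedy w ws cur).flatMap (pvChunkA (w.toNat - 1)))
    ∧ (∀ out : List (List Char),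
      (let st := ws.foldl (pvStepB w) (out, ([] : List Char))
       if st.2.isEmpty then st.1 else st.1 ++ [st.2])
      = out ++ (match ws with
                | [] => []
                | wd :: rest => (pvGreedy w rest wd).flatMap (pvChunkA (w.toNat - 1)))) := by
  induction ws with
  | nil =>
    constructor
    · intro out cur hne hle
      simp only [List.foldl_nil]
      rw [if_neg (by simpa using hne)]
      rw [pvGreedy, List.flatMap_cons, List.flatMap_nil,
        pvChunkA_short _ _ hne (by omega)]
      simp
    · intro out
      simp
  | cons wd rest ih =>
    have hwd : wd ≠ [] := hws wd (by simp)
    have hrest : ∀ x ∈ rest, x ≠ [] := fun x hx => hws x (by simp [hx])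
    obtain ⟨ihM, ihF⟩ := ih hrest
    have hcur_chunk : ∀ cur : List Char, cur ≠ [] → (cur.length : Int) ≤ w →
        pvChunkA (w.toNat - 1) cur = [cur] :=
      fun cur hne hle => pvChunkA_short _ _ hne (by omega)
    constructor
    · intro out cur hne hle
      simp only [List.foldl_cons]
      by_cases hlong : w < (wd.length : Int)
      · rw [show pvStepB w (out, cur) wd
              = (pvChunksB (w.toNat - 1) wd 0 (out ++ [cur]), []) by
            unfold pvStepB
            rw [if_pos hlong]
            simp [List.isEmpty_iff, hne]]
        rw [ihF, pvChunksB_eq, List.drop_zero]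
        have hnofit : ¬ (((cur ++ ' ' :: wd).length : Int) ≤ w) := by
          have h1 : 1 ≤ cur.length := List.length_pos_iff.mpr hne
          simp only [List.length_append, List.length_cons]
          push_cast
          omega
        rw [pvGreedy, if_neg hnofit]
        rw [List.flatMap_cons, hcur_chunk cur hne hle, pvGreedy_overlong w rest wd hlong,
          List.flatMap_cons]
        cases rest <;> simp
      · rw [show pvStepB w (out, cur) wd
              = if (cur.length : Int) + 1 + (wd.length : Int) ≤ w then (out, cur ++ ' ' :: wd)
                else (out ++ [cur], wd) by
            unfold pvStepB
            rw [if_neg hlong, if_neg (by simpa using hne)]]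
        by_cases hfit : (cur.length : Int) + 1 + (wd.length : Int) ≤ w
        · rw [if_pos hfit, ihM _ _ (by simp) (by simp; omega)]
          rw [pvGreedy, if_pos (by simp; omega)]
        · rw [if_neg hfit, ihM _ _ hwd (by omega)]
          rw [pvGreedy, if_neg (by simp; omega)]
          rw [List.flatMap_cons, hcur_chunk cur hne hle]
          simp
    · intro out
      simp only [List.foldl_cons]
      by_cases hlong : w < (wd.length : Int)
      · rw [show pvStepB w (out, ([] : List Char)) wd
              = (pvChunksB (w.toNat - 1) wd 0 out, []) by
            unfold pvStepB
            rw [if_pos hlong]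
            simp]
        rw [ihF, pvChunksB_eq, List.drop_zero]
        rw [pvGreedy_overlong w rest wd hlong, List.flatMap_cons]
        cases rest <;> simp
      · rw [show pvStepB w (out, ([] : List Char)) wd = (out, wd) by
            unfold pvStepB
            rw [if_neg hlong]
            simp]
        exact ihM out wd hwd (by omega)

-- split₀ produces only nonempty words
theorem pvSplitGo_mem_ne_nil (s cur : List Char) (acc : List (List Char))
    (hacc : ∀ x ∈ acc, x ≠ []) :
    ∀ l ∈ PySem.Chars.split₀.go s cur acc, l ≠ [] := by
  induction s generalizing cur acc with
  | nil =>
    intro l hl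
    simp only [PySem.Chars.split₀.go] at hl
    split at hl
    · exact hacc l (by simpa using hl)
    · rename_i hcur
      rw [List.mem_reverse, List.mem_cons] at hl
      rcases hl with rfl | h
      · simpa using (by simpa using hcur : cur ≠ [])
      · exact hacc l h
  | cons c rest ih =>
    intro l hl
    simp only [PySem.Chars.split₀.go] at hl
    split at hl
    · split at hl
      · exact ih [] acc hacc l hl
      · rename_i hcur
        refine ih [] _ ?_ l hl
        intro x hx
        rcases List.mem_cons.mp hx with rfl | h
        · simpa using (by simpa using hcur : cur ≠ [])
        · exact hacc x h
    · exact ih (c :: cur) acc hacc l hl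

theorem pvSplit₀_mem_ne_nil (t : List Char) : ∀ l ∈ PySem.Chars.split₀ t, l ≠ [] := by
  intro l hl
  exact pvSplitGo_mem_ne_nil t [] [] (by simp) l hl

theorem pvSplitGo_ne_nil (s cur : List Char) (acc : List (List Char))
    (h : (∃ c ∈ s, PySem.Chars.isspace c = false) ∨ cur ≠ [] ∨ acc ≠ []) :
    PySem.Chars.split₀.go s cur acc ≠ [] := by
  induction s generalizing cur acc with
  | nil =>
    simp only [PySem.Chars.split₀.go]
    rcases h with ⟨c, hc, _⟩ | h | h
    · simp at hc
    · rw [if_neg (by simpa using h)]; simp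
    · split <;> simp [h]
  | cons c rest ih =>
    simp only [PySem.Chars.split₀.go]
    by_cases hs : PySem.Chars.isspace c = true
    · rw [if_pos hs]
      rcases h with ⟨d, hd, hds⟩ | h | h
      · rcases List.mem_cons.mp hd with rfl | hd'
        · rw [hs] at hds; cases hds
        · split
          · exact ih [] acc (Or.inl ⟨d, hd', hds⟩)
          · exact ih [] _ (Or.inl ⟨d, hd', hds⟩)
      · rw [if_neg (by simpa using h)]
        exact ih [] _ (Or.inr (Or.inr (by simp)))
      · split
        · exact ih [] acc (Or.inr (Or.inr h))
        · exact ih [] _ (Or.inr (Or.inr (by simp)))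
    · rw [if_neg hs]
      exact ih (c :: cur) acc (Or.inr (Or.inl (by simp)))

theorem pvStrip_has_nonspace (s : List Char) (h : PySem.Chars.strip s ≠ []) :
    ∃ c ∈ PySem.Chars.strip s, PySem.Chars.isspace c = false := by
  unfold PySem.Chars.strip PySem.Chars.rstrip at *
  set u := (PySem.Chars.lstrip s).reverse with hu
  have hne : u.dropWhile PySem.Chars.isspace ≠ [] := by
    intro hx; exact h (by rw [hx]; simp)
  refine ⟨(u.dropWhile PySem.Chars.isspace).head hne, ?_, ?_⟩
  · rw [List.mem_reverse]; exact List.head_mem hne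
  · simpa using List.head_dropWhile_not PySem.Chars.isspace hne

theorem pvSplit₀_strip_ne_nil (s : List Char) (h : PySem.Chars.strip s ≠ []) :
    PySem.Chars.split₀ (PySem.Chars.strip s) ≠ [] := by
  obtain ⟨c, hc, hcs⟩ := pvStrip_has_nonspace s h
  exact pvSplitGo_ne_nil _ [] [] (Or.inl ⟨c, hc, hcs⟩)

-- ===== VERDICT (by name: the statement is the Claim_ definition above) =====
theorem wrap_words_py_spec : Claim_equal_wrap_words_py := by
  intro text width _
  unfold Spec_wrap_words_py wrap_words_py wrap_words_py_alt
  set t := PySem.Chars.strip text.toList with ht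
  by_cases hte : t.isEmpty
  · simp only [hte, if_true]
  · simp only [hte]
    have htne : t ≠ [] := by simp_all
    set w : Int := max 1 width with hw
    have hw1 : 1 ≤ w := le_max_left 1 width
    have hsne : PySem.Chars.split₀ t ≠ [] := pvSplit₀_strip_ne_nil _ htne
    have hmem := pvSplit₀_mem_ne_nil t
    rw [if_neg (by simpa using hsne)]
    obtain ⟨w0, ws, hws⟩ := List.exists_cons_of_ne_nil hsne
    rw [hws]
    simp only [List.tail_cons, List.headD_cons, List.foldl_cons]
    have hw0 : w0 ≠ [] := hmem w0 (by rw [hws]; simp)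
    have hwsmem : ∀ x ∈ ws, x ≠ [] := fun x hx => hmem x (by rw [hws]; simp [hx])
    have hA := pvFoldA_eq w ws [] w0
    simp only at hA
    rw [hA, List.nil_append]
    have hallmem : ∀ x ∈ w0 :: ws, x ≠ [] := by
      intro x hx
      rcases List.mem_cons.mp hx with rfl | h
      · exact hw0
      · exact hwsmem x h
    have hB := (pvFoldB_both w hw1 (w0 :: ws) hallmem).2 []
    simp only [List.foldl_cons] at hB ⊢
    rw [hB, List.nil_append]
    rw [pvNormA_eq w hw1 _ [] (pvGreedy_mem_ne_nil w ws w0 hw0 hwsmem), List.nil_append]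
    have hnormne : (pvGreedy w ws w0).flatMap (pvChunkA (w.toNat - 1)) ≠ [] := by
      obtain ⟨l0, ls, hg⟩ := List.exists_cons_of_ne_nil (pvGreedy_ne_nil w ws w0)
      have hl0 : l0 ≠ [] := pvGreedy_mem_ne_nil w ws w0 hw0 hwsmem l0 (by rw [hg]; simp)
      rw [hg, List.flatMap_cons]
      intro hcontra
      exact pvChunkA_ne_nil _ l0 hl0 (List.append_eq_nil_iff.mp hcontra).1
    have hfalse : ((pvGreedy w ws w0).flatMap (pvChunkA (w.toNat - 1))).isEmpty = false := by
      simpa using hnormne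
    rw [hfalse]
    simp
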